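-- pv_equiv track=rewrite | github.com/wararaki/aoj | vol06/p0609.py | solve
-- ===== SOURCE A (Python) =====
-- def solve(n, m, targets, games):
--     counter = [0 for i in range(n+1)]
--
--     for i in range(m):
--         for j in range(n):
--             if games[i][j] == targets[i]:
--                 counter[j+1] += 1
--             else:
--                 counter[targets[i]] += 1
--
--     return counter
-- ===== SOURCE B (Python) =====
-- def solve(n, m, targets, games):
--     # Output-indexed closed form: the score of player p is the number of rows
--     # that match at column p-1, plus, for every row targeting p, that row's
--     # mismatch count.  Slot 0 is a dummy and stays 0.
--     miss = [sum(games[i][j] != targets[i] for j in range(n)) for i in range(m)]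
--
--     def score(p):
--         wins = sum(games[i][p - 1] == targets[i] for i in range(m))
--         bonus = sum(miss[i] for i in range(m) if targets[i] == p)
--         return wins + bonus
--
--     return [score(p) if p > 0 else 0 for p in range(n + 1)]
-- ===== Notes on version B (the rewrite author's own statement) =====
-- stated objective: alternative
-- what changed: B replaces A's cell-by-cell mutation of a shared counter list by an output-indexed closed form: it precomputes each row's mismatch count once, then computes every player's score directly as the number of rows matching at that player's column plus the mismatch counts of the rows targeting that player.
-- intended difference: On inputs where some scanned row has a mismatch but its target is not a player number 1..n, A silently credits a wrong counter slot (slot 0, or a wrapped slot via Python's negative indexing); B credits no player there, the intended behaviour since targets are player numbers 1..n. — e.g. on solve(2, 1, [0], [[0, 3]]): A returns [1, 1, 0], B returns [0, 1, 0]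
import Mathlib
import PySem

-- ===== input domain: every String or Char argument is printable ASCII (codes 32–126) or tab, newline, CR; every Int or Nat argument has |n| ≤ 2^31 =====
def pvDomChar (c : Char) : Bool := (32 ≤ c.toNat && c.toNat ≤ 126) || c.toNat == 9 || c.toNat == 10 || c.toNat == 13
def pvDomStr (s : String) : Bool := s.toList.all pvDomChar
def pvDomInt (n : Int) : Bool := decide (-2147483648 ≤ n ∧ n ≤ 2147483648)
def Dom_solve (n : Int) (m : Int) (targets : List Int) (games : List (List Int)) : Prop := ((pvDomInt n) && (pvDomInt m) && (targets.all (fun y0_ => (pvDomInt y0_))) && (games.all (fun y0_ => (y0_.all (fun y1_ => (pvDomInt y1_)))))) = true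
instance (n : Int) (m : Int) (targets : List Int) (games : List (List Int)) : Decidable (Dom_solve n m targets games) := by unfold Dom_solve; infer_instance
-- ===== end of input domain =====

-- B computes every output cell by a closed form (matches in that column plus the mismatch
-- counts of the rows targeting that player) instead of A's cell-by-cell counter mutation;
-- objective: alternative decomposition.

-- ===== PORT A =====
-- 'counter[x] += 1' with a possibly negative Python index: wrap by the list length, then add 1
-- in place (out-of-range index leaves the list unchanged; Pre_solve excludes exactly the inputs
-- where Python would raise IndexError there).
def pvAddNat : List Int → Nat → List Int
  | [], _ => []
  | x :: xs, 0 => (x + 1) :: xs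
  | x :: xs, k + 1 => x :: pvAddNat xs k

def pvWrapIdx (len : Nat) (i : Int) : Nat := (if i < 0 then (len : Int) + i else i).toNat

def pyBump (xs : List Int) (i : Int) : List Int := pvAddNat xs (pvWrapIdx xs.length i)

def solve (n : Int) (m : Int) (targets : List Int) (games : List (List Int)) : List Int :=
  (List.range m.toNat).foldl (fun counter i =>
    (List.range n.toNat).foldl (fun counter j =>
      if (games.getD i []).getD j 0 == targets.getD i 0 then
        pyBump counter ((j : Int) + 1)
      else
        pyBump counter (targets.getD i 0)) counter)
    (List.replicate (n + 1).toNat 0)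

-- ===== PORT B =====
def solve_alt (n : Int) (m : Int) (targets : List Int) (games : List (List Int)) : List Int :=
  let miss : List Int := (List.range m.toNat).map (fun i =>
    ((List.range n.toNat).map (fun j =>
      if (games.getD i []).getD j 0 != targets.getD i 0 then (1 : Int) else 0)).sum)
  (List.range (n + 1).toNat).map (fun p =>
    if 0 < p then
      ((List.range m.toNat).map (fun i =>
        if (games.getD i []).getD (p - 1) 0 == targets.getD i 0 then (1 : Int) else 0)).sum
      + (((List.range m.toNat).filter (fun i => targets.getD i 0 == (p : Int))).map
          (fun i => miss.getD i 0)).sum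
    else 0)

-- ===== PRECONDITION & SPEC =====
-- Pre_solve holds exactly when Python A returns: every scanned row index is inside targets and
-- games, every scanned row is at least n long, and whenever a row has a mismatch the target is a
-- valid (possibly negative) Python index into the length-(n+1) counter.
def Pre_solve (n : Int) (m : Int) (targets : List Int) (games : List (List Int)) : Prop :=
  0 < n → 0 < m →
    m ≤ (games.length : Int) ∧ m ≤ (targets.length : Int) ∧
    ∀ i ∈ List.range (min m (min (games.length : Int) (targets.length : Int))).toNat,
      n ≤ ((games.getD i []).length : Int) ∧
      (((games.getD i []).take n.toNat).any (fun g => g != targets.getD i 0) = true →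
        -(n + 1) ≤ targets.getD i 0 ∧ targets.getD i 0 ≤ n)
instance (n : Int) (m : Int) (targets : List Int) (games : List (List Int)) : Decidable (Pre_solve n m targets games) := by unfold Pre_solve; infer_instance

def pvWitness_solve : Int × Int × List Int × List (List Int) := (2, 1, [1], [[1, 3]])

-- On rows that have a mismatch but whose target is not a player number 1..n, A silently credits
-- a wrong counter slot (slot 0, or a wrapped slot for a negative target); B credits no player
-- there, the intended behaviour since targets are player numbers 1..n.
def D_solve (n : Int) (m : Int) (targets : List Int) (games : List (List Int)) : Prop :=
  0 < n ∧ 0 < m ∧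
  ∃ i ∈ List.range (min m (min (games.length : Int) (targets.length : Int))).toNat,
    (((games.getD i []).take n.toNat).any (fun g => g != targets.getD i 0) = true) ∧
    ¬(1 ≤ targets.getD i 0 ∧ targets.getD i 0 ≤ n)
instance (n : Int) (m : Int) (targets : List Int) (games : List (List Int)) : Decidable (D_solve n m targets games) := by unfold D_solve; infer_instance

def Spec_solve (n : Int) (m : Int) (targets : List Int) (games : List (List Int)) (out : List Int) : Prop := ¬ D_solve n m targets games → out = solve_alt n m targets games
instance (n : Int) (m : Int) (targets : List Int) (games : List (List Int)) (out : List Int) : Decidable (Spec_solve n m targets games out) := by unfold Spec_solve; infer_instance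

def pvDiffWitness_solve : Int × Int × List Int × List (List Int) := (2, 1, [0], [[0, 3]])
def pvDiffWitnessOut_solve : (List Int) × (List Int) := ([1, 1, 0], [0, 1, 0])

-- ===== CLAIM (what is proved, stated in full; the proofs are below) =====
def Claim_unchanged_solve : Prop := ∀ (n : Int) (m : Int) (targets : List Int) (games : List (List Int)), Dom_solve n m targets games → Pre_solve n m targets games → Spec_solve n m targets games (solve n m targets games)
def Claim_changed_solve : Prop := Dom_solve (pvDiffWitness_solve.1) (pvDiffWitness_solve.2.1) (pvDiffWitness_solve.2.2.1) (pvDiffWitness_solve.2.2.2) ∧ Pre_solve (pvDiffWitness_solve.1) (pvDiffWitness_solve.2.1) (pvDiffWitness_solve.2.2.1) (pvDiffWitness_solve.2.2.2) ∧ D_solve (pvDiffWitness_solve.1) (pvDiffWitness_solve.2.1) (pvDiffWitness_solve.2.2.1) (pvDiffWitness_solve.2.2.2) ∧ solve (pvDiffWitness_solve.1) (pvDiffWitness_solve.2.1) (pvDiffWitness_solve.2.2.1) (pvDiffWitness_solve.2.2.2) = pvDiffWitnessOut_solve.1 ∧ solve_alt (pvDiffWitness_solve.1) (pvDiffWitness_solve.2.1)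 (pvDiffWitness_solve.2.2.1) (pvDiffWitness_solve.2.2.2) = pvDiffWitnessOut_solve.2 ∧ pvDiffWitnessOut_solve.1 ≠ pvDiffWitnessOut_solve.2

def Claim_exact_solve : Prop := ∀ (n : Int) (m : Int) (targets : List Int) (games : List (List Int)), Dom_solve n m targets games → Pre_solve n m targets games → D_solve n m targets games → solve n m targets games ≠ solve_alt n m targets games

-- ===== LEMMAS AND PROOFS =====

theorem pvAddNat_length (xs : List Int) (k : Nat) : (pvAddNat xs k).length = xs.length := by
  induction xs generalizing k with
  | nil => rfl
  | cons x xs ih => cases k <;> simp [pvAddNat, ih]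

theorem pvAddNat_getD (xs : List Int) (k p : Nat) :
    (pvAddNat xs k).getD p 0 = xs.getD p 0 + (if p = k ∧ k < xs.length then 1 else 0) := by
  induction xs generalizing k p with
  | nil => simp [pvAddNat]
  | cons x xs ih =>
    cases k with
    | zero => cases p <;> simp [pvAddNat]
    | succ k =>
      cases p with
      | zero => simp [pvAddNat]
      | succ p => simpa [pvAddNat, Nat.succ_lt_succ_iff] using ih k p

theorem pyBump_length (xs : List Int) (i : Int) : (pyBump xs i).length = xs.length := by
  simp [pyBump, pvAddNat_length]

theorem pyBump_getD (xs : List Int) (i : Int) (p : Nat) (hp : p < xs.length) :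
    (pyBump xs i).getD p 0 = xs.getD p 0 + (if pvWrapIdx xs.length i = p then 1 else 0) := by
  rw [pyBump, pvAddNat_getD]
  by_cases h : pvWrapIdx xs.length i = p
  · simp [h, hp]
  · have hne : ¬(p = pvWrapIdx xs.length i ∧ pvWrapIdx xs.length i < xs.length) :=
      fun hh => h hh.1.symm
    simp [hne, h]

/-- A fold of `pyBump`s adds, at each in-range position `p`, the number of steps whose effective
index is `p`. -/
theorem foldl_pyBump_getD {α : Type} (f : α → Int) (L : List α) (c : List Int) (p : Nat)
    (hp : p < c.length) :
    (L.foldl (fun c x => pyBump c (f x)) c).getD p 0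
      = c.getD p 0 + (L.countP (fun x => pvWrapIdx c.length (f x) == p) : Int) := by
  induction L generalizing c with
  | nil => simp
  | cons a L ih =>
    simp only [List.foldl_cons, List.countP_cons]
    rw [ih (pyBump c (f a)) (by simpa [pyBump_length] using hp),
        pyBump_getD c (f a) p hp]
    simp only [pyBump_length]
    by_cases h : pvWrapIdx c.length (f a) = p <;> simp [h] <;> push_cast <;> ring

theorem foldl_pyBump_length {α : Type} (f : α → Int) (L : List α) (c : List Int) :
    (L.foldl (fun c x => pyBump c (f x)) c).length = c.length := by
  induction L generalizing c with
  | nil => rfl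
  | cons a L ih => simp [List.foldl_cons, ih, pyBump_length]

/-- A sum of 0/1 indicators is a `countP`, cast to `Int`. -/
theorem sum_ind {α : Type} (l : List α) (P : α → Bool) :
    (l.map (fun x => if P x then (1 : Int) else 0)).sum = (l.countP P : Int) := by
  induction l with
  | nil => simp
  | cons a l ih =>
    simp only [List.map_cons, List.sum_cons, List.countP_cons, ih]
    by_cases h : P a <;> simp [h] <;> push_cast <;> ring

theorem countP_flatMap {α β : Type} (l : List α) (f : α → List β) (P : β → Bool) :
    (l.flatMap f).countP P = (l.map (fun a => (f a).countP P)).sum := by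
  induction l with
  | nil => simp
  | cons a l ih => simp [List.flatMap_cons, List.countP_append, ih]

theorem countP_or_disjoint {α : Type} (l : List α) (P Q : α → Bool)
    (h : ∀ x ∈ l, P x = true → Q x = false) :
    l.countP (fun x => P x || Q x) = l.countP P + l.countP Q := by
  induction l with
  | nil => simp
  | cons a l ih =>
    simp only [List.countP_cons]
    rw [ih (fun x hx => h x (List.mem_cons_of_mem a hx))]
    by_cases hp : P a
    · have := h a List.mem_cons_self hp
      simp [hp, this]; omega
    · by_cases hq : Q a <;> simp [hp, hq] <;> omega

/-- Count of `Q j && j == a` over `range k` with `a < k` is the indicator of `Q a`. -/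
theorem countP_range_single (k a : Nat) (Q : Nat → Bool) (ha : a < k) :
    (List.range k).countP (fun j => Q j && j == a) = if Q a then 1 else 0 := by
  induction k with
  | zero => omega
  | succ k ih =>
    rw [List.range_succ, List.countP_append]
    by_cases hak : a < k
    · rw [ih hak]
      have : ((fun j => Q j && j == a) k) = false := by simp; omega
      simp [this]
    · have hak' : a = k := by omega
      subst hak'
      have h0 : (List.range a).countP (fun j => Q j && j == a) = 0 := by
        rw [List.countP_eq_zero]
        intro j hj
        simp only [List.mem_range] at hj
        simp; omega
      by_cases hq : Q a <;> simp [h0, hq]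

theorem sum_map_filter {α : Type} (l : List α) (Q : α → Bool) (f : α → Int) :
    ((l.filter Q).map f).sum = (l.map (fun x => if Q x then f x else 0)).sum := by
  induction l with
  | nil => simp
  | cons a l ih =>
    by_cases h : Q a <;> simp [List.filter_cons, h, ih]

theorem sum_map_add {α : Type} (l : List α) (f g : α → Int) :
    (l.map (fun x => f x + g x)).sum = (l.map f).sum + (l.map g).sum := by
  induction l with
  | nil => simp
  | cons a l ih => simp [ih]; ring

/-- Per-row characterisation: in one row with target `t`, the number of scanned cells whose
effective counter index is `p ≥ 1` is the match indicator at column `p-1` plus, if `t = p`,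
the row's mismatch count. -/
theorem row_count (nn p : Nat) (row : List Int) (t : Int) (hp0 : 0 < p) (hps : p - 1 < nn) :
    (List.range nn).countP (fun j => (if row.getD j 0 == t then ((j : Int) + 1) else t) == (p : Int))
    = (if row.getD (p - 1) 0 == t then 1 else 0)
      + (if t == (p : Int) then (List.range nn).countP (fun j => row.getD j 0 != t) else 0) := by
  have hcongr : (List.range nn).countP
        (fun j => (if row.getD j 0 == t then ((j : Int) + 1) else t) == (p : Int))
      = (List.range nn).countP
        (fun j => ((row.getD j 0 == t) && (j == p - 1)) || (!(row.getD j 0 == t) && (t == (p : Int)))) := by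
    refine List.countP_congr ?_
    intro j hj
    simp only [List.mem_range] at hj
    cases hb : (row.getD j 0 == t) with
    | true =>
      simp
      omega
    | false =>
      simp
  rw [hcongr, countP_or_disjoint _ _ _ (by
    intro j _ hPj
    simp only [Bool.and_eq_true] at hPj
    rw [hPj.1]
    simp)]
  rw [countP_range_single nn (p - 1) _ hps]
  cases htb : (t == (p : Int)) with
  | true =>
    simp only [Bool.and_true, if_true]
    congr 1
  | false =>
    simp

theorem pvAddNat_sum (xs : List Int) (k : Nat) :
    (pvAddNat xs k).sum = xs.sum + (if k < xs.length then (1 : Int) else 0) := by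
  induction xs generalizing k with
  | nil => simp [pvAddNat]
  | cons x xs ih =>
    cases k with
    | zero => simp [pvAddNat]; ring
    | succ k =>
      simp only [pvAddNat, List.sum_cons, ih, List.length_cons, Nat.succ_lt_succ_iff]
      ring

theorem pyBump_sum (xs : List Int) (i : Int) :
    (pyBump xs i).sum = xs.sum + (if pvWrapIdx xs.length i < xs.length then (1 : Int) else 0) := by
  simp [pyBump, pvAddNat_sum]

theorem foldl_pyBump_sum {α : Type} (f : α → Int) (L : List α) (c : List Int) :
    (L.foldl (fun c x => pyBump c (f x)) c).sum
      = c.sum + (L.countP (fun x => decide (pvWrapIdx c.length (f x) < c.length)) : Int) := by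
  induction L generalizing c with
  | nil => simp
  | cons a L ih =>
    simp only [List.foldl_cons, List.countP_cons]
    rw [ih (pyBump c (f a))]
    simp only [pyBump_length, pyBump_sum]
    by_cases h : pvWrapIdx c.length (f a) < c.length <;> simp [h] <;> push_cast <;> ring

/-- B's slot expression for player `p` counts the scanned cells whose effective index is `p`. -/
theorem b_slot_count (mm nn p : Nat) (targets : List Int) (games : List (List Int))
    (hp0 : 0 < p) (hps : p - 1 < nn) :
    ((List.range mm).map (fun i =>
      if (games.getD i []).getD (p - 1) 0 == targets.getD i 0 then (1 : Int) else 0)).sum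
    + (((List.range mm).filter (fun i => targets.getD i 0 == (p : Int))).map
        (fun i => ((List.range mm).map (fun i2 =>
          ((List.range nn).map (fun j =>
            if (games.getD i2 []).getD j 0 != targets.getD i2 0 then (1 : Int) else 0)).sum)).getD i 0)).sum
    = (((List.range mm).flatMap (fun i => (List.range nn).map (fun j => (i, j)))).countP
        (fun ij => (if (games.getD ij.1 []).getD ij.2 0 == targets.getD ij.1 0
                    then (ij.2 : Int) + 1 else targets.getD ij.1 0) == (p : Int)) : Int) := by
  symm
  rw [countP_flatMap]
  have hrowAll : ∀ i ∈ List.range mm,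
      ((List.range nn).map (fun j => (i, j))).countP
        (fun ij => (if (games.getD ij.1 []).getD ij.2 0 == targets.getD ij.1 0
                    then (ij.2 : Int) + 1 else targets.getD ij.1 0) == (p : Int))
      = (if (games.getD i []).getD (p - 1) 0 == targets.getD i 0 then 1 else 0)
        + (if targets.getD i 0 == (p : Int) then
            (List.range nn).countP (fun j => (games.getD i []).getD j 0 != targets.getD i 0)
           else 0) := by
    intro i _
    rw [List.countP_map]
    exact row_count nn p (games.getD i []) (targets.getD i 0) hp0 hps
  rw [List.map_congr_left hrowAll, Nat.cast_list_sum, List.map_map]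
  rw [sum_map_filter]
  have hmissgetD : ∀ i ∈ List.range mm,
      ((List.range mm).map (fun i2 =>
        ((List.range nn).map (fun j =>
          if (games.getD i2 []).getD j 0 != targets.getD i2 0 then (1 : Int) else 0)).sum)).getD i 0
      = ((List.range nn).countP (fun j =>
          (games.getD i []).getD j 0 != targets.getD i 0) : Int) := by
    intro i hi
    simp only [List.mem_range] at hi
    rw [List.getD_eq_getElem _ 0 (by simpa using hi), List.getElem_map, List.getElem_range,
      sum_ind]
  have hbonus : ∀ i ∈ List.range mm,
      (if targets.getD i 0 == (p : Int) then
        ((List.range mm).map (fun i2 =>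
          ((List.range nn).map (fun j =>
            if (games.getD i2 []).getD j 0 != targets.getD i2 0 then (1 : Int) else 0)).sum)).getD i 0
      else 0)
      = (if targets.getD i 0 == (p : Int) then
          ((List.range nn).countP (fun j =>
            (games.getD i []).getD j 0 != targets.getD i 0) : Int)
         else 0) := by
    intro i hi
    cases ht : (targets.getD i 0 == (p : Int)) with
    | true =>
      simp only [if_true]
      exact hmissgetD i hi
    | false =>
      simp
  rw [List.map_congr_left hbonus, ← sum_map_add]
  refine congrArg List.sum (List.map_congr_left ?_)
  intro i _
  simp only [Function.comp]
  cases h1 : ((games.getD i []).getD (p - 1) 0 == targets.getD i 0) <;>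
    cases h2 : (targets.getD i 0 == (p : Int)) <;>
      simp

/-- Summing per-slot counts over slots `1..K` counts the elements whose value lies in `1..K`. -/
theorem countP_shift_partition {α : Type} (K : Nat) (l : List α) (f : α → Int) :
    ((List.range K).map (fun (p : Nat) => (l.countP (fun x => f x == ((p : Int) + 1)) : Int))).sum
    = (l.countP (fun x => decide (1 ≤ f x ∧ f x ≤ (K : Int))) : Int) := by
  induction K with
  | zero =>
    rw [List.countP_eq_zero.mpr]
    · simp
    · intro x _
      simp; omega
  | succ K ih =>
    rw [List.range_succ, List.map_append, List.sum_append, ih]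
    have hsplit : l.countP (fun x => decide (1 ≤ f x ∧ f x ≤ ((K + 1 : Nat) : Int)))
        = l.countP (fun x => decide (1 ≤ f x ∧ f x ≤ (K : Int)) || (f x == (K : Int) + 1)) := by
      refine List.countP_congr ?_
      intro x _
      rw [Bool.eq_iff_iff]
      simp
      omega
    rw [hsplit, countP_or_disjoint _ _ _ (by
      intro x _ hPx
      simp only [decide_eq_true_eq] at hPx
      simp
      omega)]
    push_cast
    simp

-- ===== VERDICT (by name: the statement is the Claim_ definition above) =====
set_option maxHeartbeats 1000000 in
theorem solve_spec : Claim_unchanged_solve := by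
  intro n m targets games _ hpre
  unfold Spec_solve
  intro hD
  unfold solve solve_alt
  by_cases hn : n ≤ 0
  · -- no cell is scanned: A is the untouched counter, B maps the constant 0
    have hnn : n.toNat = 0 := by omega
    have h01 : (n + 1).toNat = 0 ∨ (n + 1).toNat = 1 := by omega
    have hA : (List.range m.toNat).foldl (fun (counter : List Int) _ => counter)
        (List.replicate (n + 1).toNat 0) = List.replicate (n + 1).toNat 0 := by
      induction (List.range m.toNat) with
      | nil => rfl
      | cons a L ih => simpa using ih
    simp only [hnn, List.range_zero, List.foldl_nil, List.map_nil, List.sum_nil]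
    rw [hA]
    rcases h01 with h | h <;> simp [h]
  · push_neg at hn
    -- row-wise facts from Pre_ and ¬D_
    have hfacts : ∀ i ∈ List.range m.toNat,
        i < games.length ∧ i < targets.length ∧ n ≤ ((games.getD i []).length : Int) ∧
        (((games.getD i []).take n.toNat).any (fun g => g != targets.getD i 0) = true →
          1 ≤ targets.getD i 0 ∧ targets.getD i 0 ≤ n) := by
      intro i hi
      simp only [List.mem_range] at hi
      by_cases hm : 0 < m
      · obtain ⟨hmg, hmt, hrows⟩ := hpre hn hm
        have hmin : min m (min (games.length : Int) (targets.length : Int)) = m := by omega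
        have hirange : i ∈ List.range (min m (min (games.length : Int) (targets.length : Int))).toNat := by
          rw [hmin]; simpa using hi
        have hrow := hrows i hirange
        refine ⟨by omega, by omega, hrow.1, ?_⟩
        intro hmis
        by_contra hbad
        exact hD ⟨hn, hm, i, hirange, hmis, hbad⟩
      · omega
    set mm := m.toNat with hmm
    set nn := n.toNat with hnn
    set s : Nat := (n + 1).toNat with hs
    have hsnn : s = nn + 1 := by omega
    set pairs : List (Nat × Nat) :=
      (List.range mm).flatMap (fun i => (List.range nn).map (fun j => (i, j))) with hpairs
    set F : Nat × Nat → Int := fun ij =>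
      if (games.getD ij.1 []).getD ij.2 0 == targets.getD ij.1 0 then (ij.2 : Int) + 1
      else targets.getD ij.1 0 with hF
    -- every scanned cell's effective index lies in 1..nn
    have hFrange : ∀ ij ∈ pairs, 1 ≤ F ij ∧ F ij ≤ (nn : Int) := by
      intro ij hij
      obtain ⟨i, hi, j, hj, hijeq⟩ : ∃ i ∈ List.range mm, ∃ j ∈ List.range nn, (i, j) = ij := by
        simpa [hpairs, List.mem_flatMap, List.mem_map] using hij
      subst hijeq
      simp only [List.mem_range] at hj
      obtain ⟨_, _, hrl, htb⟩ := hfacts i hi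
      simp only [hF]
      by_cases hmatch : ((games.getD i []).getD j 0 == targets.getD i 0) = true
      · simp only [if_pos hmatch]; omega
      · simp only [if_neg hmatch]
        have hmem : ((games.getD i []).take nn).any (fun g => g != targets.getD i 0) = true := by
          rw [List.any_eq_true]
          refine ⟨(games.getD i []).getD j 0, ?_, by simpa using hmatch⟩
          rw [List.getD_eq_getElem _ 0 (by omega)]
          exact List.mem_take_iff_getElem.mpr ⟨j, by omega, by simp⟩
        have := htb hmem
        omega
    -- A's nested loop is the flat fold of pyBumps over `pairs`
    have hA : (List.range mm).foldl (fun counter i =>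
        (List.range nn).foldl (fun counter j =>
          if (games.getD i []).getD j 0 == targets.getD i 0 then
            pyBump counter ((j : Int) + 1)
          else
            pyBump counter (targets.getD i 0)) counter) (List.replicate s 0)
        = pairs.foldl (fun c ij => pyBump c (F ij)) (List.replicate s 0) := by
      rw [hpairs, List.foldl_flatMap]
      refine PySem.List.foldl_congr_mem _ _ _ _ ?_
      intro c i _
      rw [List.foldl_map]
      refine PySem.List.foldl_congr_mem _ _ _ _ ?_
      intro c' j _
      simp only [hF]
      split <;> rfl
    rw [hA]
    have hlenA : (pairs.foldl (fun c ij => pyBump c (F ij)) (List.replicate s 0)).length = s := by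
      rw [foldl_pyBump_length]; simp
    apply List.ext_getElem
    · simp [hlenA]
    · intro p h1 h2
      have hp : p < s := by simpa [hlenA] using h1
      have hgetA : (pairs.foldl (fun c ij => pyBump c (F ij)) (List.replicate s 0)).getD p 0
          = (pairs.countP (fun ij => pvWrapIdx s (F ij) == p) : Int) := by
        rw [foldl_pyBump_getD F pairs (List.replicate s 0) p (by simpa using hp)]
        simp [hp]
      rw [← List.getD_eq_getElem _ 0 h1, hgetA, List.getElem_map, List.getElem_range]
      -- effective index is nonnegative, so no wraparound: compare F directly
      have hcnt : pairs.countP (fun ij => pvWrapIdx s (F ij) == p)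
          = pairs.countP (fun ij => F ij == (p : Int)) := by
        refine List.countP_congr ?_
        intro ij hij
        obtain ⟨hlo, hhi⟩ := hFrange ij hij
        have hw : pvWrapIdx s (F ij) = (F ij).toNat := by
          simp only [pvWrapIdx]; rw [if_neg (by omega)]
        rw [hw]
        cases hq : (F ij == (p : Int)) with
        | true =>
          have he : F ij = (p : Int) := by simpa using hq
          rw [he]
          simp
        | false =>
          have he : ¬ F ij = (p : Int) := by simpa using hq
          have hne : ¬ (F ij).toNat = p := fun hc =>
            he (by rw [← Int.toNat_of_nonneg (show (0 : Int) ≤ F ij by omega), hc])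
          simpa using hne
      rw [hcnt]
      by_cases hp0 : 0 < p
      case neg =>
        -- p = 0: no cell credits slot 0
        have hz : p = 0 := by omega
        subst hz
        rw [List.countP_eq_zero.mpr]
        · simp
        · intro ij hij
          have := hFrange ij hij
          simp only [beq_iff_eq]
          omega
      case pos =>
        rw [if_pos hp0]
        have hps : p - 1 < nn := by omega
        rw [hpairs, hF]
        exact (b_slot_count mm nn p targets games hp0 hps).symm

set_option maxHeartbeats 1000000 in
theorem solve_tight : Claim_exact_solve := by
  intro n m targets games _ hpre hD heq
  obtain ⟨hn, hm, i0, hi0r, hmis0, hbad0⟩ := hD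
  obtain ⟨hmg, hmt, hrows⟩ := hpre hn hm
  have hmin : min m (min (games.length : Int) (targets.length : Int)) = m := by omega
  rw [hmin] at hi0r hrows
  simp only [List.mem_range] at hi0r
  set mm := m.toNat with hmm
  set nn := n.toNat with hnn
  set s : Nat := (n + 1).toNat with hs
  have hsnn : s = nn + 1 := by omega
  set F : Nat × Nat → Int := fun ij =>
    if (games.getD ij.1 []).getD ij.2 0 == targets.getD ij.1 0 then (ij.2 : Int) + 1
    else targets.getD ij.1 0 with hF
  set pairs : List (Nat × Nat) :=
    (List.range mm).flatMap (fun i => (List.range nn).map (fun j => (i, j))) with hpairs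
  -- every scanned cell's effective Python index is in range: A's sum is the number of cells
  have hWrap : ∀ ij ∈ pairs, pvWrapIdx s (F ij) < s := by
    intro ij hij
    obtain ⟨i, hi, j, hj, hijeq⟩ : ∃ i ∈ List.range mm, ∃ j ∈ List.range nn, (i, j) = ij := by
      simpa [hpairs, List.mem_flatMap, List.mem_map] using hij
    subst hijeq
    simp only [List.mem_range] at hi hj
    have hrow := hrows i (by simp only [List.mem_range]; omega)
    simp only [hF]
    by_cases hmatch : ((games.getD i []).getD j 0 == targets.getD i 0) = true
    · rw [if_pos hmatch]
      simp only [pvWrapIdx]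
      rw [if_neg (by omega)]
      omega
    · rw [if_neg hmatch]
      have hmem : ((games.getD i []).take nn).any (fun g => g != targets.getD i 0) = true := by
        rw [List.any_eq_true]
        refine ⟨(games.getD i []).getD j 0, ?_, by simpa using hmatch⟩
        rw [List.getD_eq_getElem _ 0 (by omega)]
        exact List.mem_take_iff_getElem.mpr ⟨j, by omega, by simp⟩
      obtain ⟨hlo, hhi⟩ := hrow.2 hmem
      simp only [pvWrapIdx]
      by_cases ht : targets.getD i 0 < 0
      · rw [if_pos ht]; omega
      · rw [if_neg ht]; omega
  -- reduce A to the flat fold and take sums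
  have hA : solve n m targets games
      = pairs.foldl (fun c ij => pyBump c (F ij)) (List.replicate s 0) := by
    unfold solve
    rw [hpairs, List.foldl_flatMap]
    refine PySem.List.foldl_congr_mem _ _ _ _ ?_
    intro c i _
    rw [List.foldl_map]
    refine PySem.List.foldl_congr_mem _ _ _ _ ?_
    intro c' j _
    simp only [hF]
    split <;> rfl
  have hAsum : (solve n m targets games).sum = (pairs.length : Int) := by
    rw [hA, foldl_pyBump_sum]
    simp only [List.sum_replicate, List.length_replicate, smul_zero, zero_add]
    congr 1
    rw [List.countP_eq_length]
    intro ij hij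
    simpa using hWrap ij hij
  -- B's sum counts only the cells whose effective index is a real player 1..nn
  have hBsum : (solve_alt n m targets games).sum
      = (pairs.countP (fun ij => decide (1 ≤ F ij ∧ F ij ≤ (nn : Int))) : Int) := by
    unfold solve_alt
    have hs1 : (n + 1).toNat = nn + 1 := by omega
    rw [hs1, List.range_succ_eq_map, List.map_cons, List.sum_cons, List.map_map]
    have h0 : (if 0 < 0 then ((List.range mm).map (fun i =>
        if (games.getD i []).getD (0 - 1) 0 == targets.getD i 0 then (1 : Int) else 0)).sum
        + (((List.range mm).filter (fun i => targets.getD i 0 == ((0 : Nat) : Int))).map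
            (fun i => ((List.range mm).map (fun i2 =>
              ((List.range nn).map (fun j =>
                if (games.getD i2 []).getD j 0 != targets.getD i2 0 then (1 : Int) else 0)).sum)).getD i 0)).sum
        else 0) = 0 := by simp
    rw [h0, zero_add]
    have hmapeq : ∀ p ∈ List.range nn,
        ((fun p => if 0 < p then
            ((List.range mm).map (fun i =>
              if (games.getD i []).getD (p - 1) 0 == targets.getD i 0 then (1 : Int) else 0)).sum
            + (((List.range mm).filter (fun i => targets.getD i 0 == (p : Int))).map
                (fun i => ((List.range mm).map (fun i2 =>
                  ((List.range nn).map (fun j =>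
                    if (games.getD i2 []).getD j 0 != targets.getD i2 0 then (1 : Int) else 0)).sum)).getD i 0)).sum
          else 0) ∘ Nat.succ) p
        = (pairs.countP (fun ij => F ij == ((p : Int) + 1)) : Int) := by
      intro p hp
      simp only [List.mem_range] at hp
      simp only [Function.comp]
      rw [if_pos (Nat.succ_pos p)]
      have hcast : ((p.succ : Nat) : Int) = (p : Int) + 1 := by push_cast; ring
      rw [hpairs, hF]
      have hbsc := b_slot_count mm nn p.succ targets games (Nat.succ_pos p)
        (by simpa using hp)
      rw [hcast] at hbsc
      exact hbsc
    rw [List.map_congr_left hmapeq, countP_shift_partition]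
  -- but the bad row's mismatch cell has effective index ≤ 0: B counts strictly fewer cells
  have hrow0 := hrows i0 (by simp only [List.mem_range]; omega)
  obtain ⟨g0, hg0mem, hg0ne⟩ := List.any_eq_true.mp hmis0
  obtain ⟨j0, hj0lt, hj0get⟩ := List.mem_take_iff_getElem.mp hg0mem
  have hj0nn : j0 < nn := by omega
  have hj0row : j0 < (games.getD i0 []).length := by
    have := hrow0.1
    omega
  have hcell : (i0, j0) ∈ pairs := by
    rw [hpairs, List.mem_flatMap]
    refine ⟨i0, by simp only [List.mem_range]; omega, ?_⟩
    rw [List.mem_map]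
    exact ⟨j0, by simp only [List.mem_range]; omega, rfl⟩
  have hFbad : ¬ (1 ≤ F (i0, j0) ∧ F (i0, j0) ≤ (nn : Int)) := by
    have hne : ¬ ((games.getD i0 []).getD j0 0 == targets.getD i0 0) = true := by
      rw [List.getD_eq_getElem _ 0 hj0row, hj0get]
      simpa using hg0ne
    simp only [hF, if_neg hne]
    intro hc
    exact hbad0 ⟨hc.1, by omega⟩
  have hlt : pairs.countP (fun ij => decide (1 ≤ F ij ∧ F ij ≤ (nn : Int))) < pairs.length := by
    rw [List.countP_lt_length_iff]
    exact ⟨(i0, j0), hcell, by simpa using hFbad⟩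
  have := congrArg List.sum heq
  rw [hAsum, hBsum] at this
  omega

theorem solve_changed : Claim_changed_solve := by unfold Claim_changed_solve; decide
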